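-- pv_equiv track=rewrite | github.com/daily-boj/x86chi | problems/P11508.py | solution
-- ===== SOURCE A (Python) =====
-- def solution(C: list):
--     answer = 0
--     C.sort(reverse=True)
--     while C:
--         lenght = len(C)
--         if lenght < 3:
--             answer += sum(C)
--             break
--         answer += sum(C[:2])
--         C = C[3:]
--     return answer
-- ===== SOURCE B (Python) =====
-- def solution(C: list):
--     s = sorted(C, reverse=True)
--     total = 0
--     for i, x in enumerate(s):
--         if i % 3 != 2:
--             total += x
--     return total
-- ===== Notes on version B (the rewrite author's own statement) =====
-- stated objective: faster
-- what changed: Replaces the while-loop that repeatedly slices the list (C[:2], C[3:], each O(n)) with a single enumerate pass over the sorted list that skips every third element.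
import Mathlib
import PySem

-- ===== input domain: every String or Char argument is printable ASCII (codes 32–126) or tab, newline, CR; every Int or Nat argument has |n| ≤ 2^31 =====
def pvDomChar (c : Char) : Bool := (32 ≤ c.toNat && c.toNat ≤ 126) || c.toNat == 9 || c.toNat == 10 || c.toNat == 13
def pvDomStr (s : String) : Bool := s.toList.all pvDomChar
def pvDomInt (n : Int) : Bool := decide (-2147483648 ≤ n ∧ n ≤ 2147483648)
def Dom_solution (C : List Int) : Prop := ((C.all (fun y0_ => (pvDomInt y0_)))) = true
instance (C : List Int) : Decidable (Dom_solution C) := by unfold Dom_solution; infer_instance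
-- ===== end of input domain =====

-- B replaces A's while-loop with repeated slicing by one enumerate pass skipping every
-- third element of the sorted list (objective: faster). A sorts its argument in place
-- (observable mutation); B does not — the equivalence proved is about the return value.

-- ===== PORT A =====
-- A's while-loop: while C: if len<3 add sum(C) and break; else add sum(C[:2]), C = C[3:]
def solLoopA (C : List Int) : Int :=
  match C with
  | [] => 0
  | a :: rest =>
      if (a :: rest).length < 3 then (a :: rest).sum
      else ((a :: rest).take 2).sum + solLoopA ((a :: rest).drop 3)
termination_by C.length
decreasing_by simp [List.length_drop]

def solution (C : List Int) : Int :=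
  solLoopA (PySem.List.sorted C (fun x => x) true)

-- ===== PORT B =====
-- B's for-loop over enumerate(s) with accumulator `total`
def solLoopB (l : List Int) (i : Nat) (total : Int) : Int :=
  match l with
  | [] => total
  | x :: xs => solLoopB xs (i + 1) (if i % 3 ≠ 2 then total + x else total)

def solution_alt (C : List Int) : Int :=
  solLoopB (PySem.List.sorted C (fun x => x) true) 0 0

-- ===== PRECONDITION & SPEC =====
def Spec_solution (C : List Int) (out : Int) : Prop := out = solution_alt C
instance (C : List Int) (out : Int) : Decidable (Spec_solution C out) := by unfold Spec_solution; infer_instance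

-- ===== CLAIM (what is proved, stated in full; the proofs are below) =====
def Claim_equal_solution : Prop := ∀ (C : List Int), Dom_solution C → Spec_solution C (solution C)

-- ===== LEMMAS AND PROOFS =====
theorem solLoopB_eq (l : List Int) (total : Int) (i : Nat) (h : i % 3 = 0) :
    solLoopB l i total = total + solLoopA l := by
  match l with
  | [] => rw [solLoopA.eq_def]; simp [solLoopB]
  | [a] =>
      rw [solLoopA.eq_def]
      simp [solLoopB, h]
  | [a, b] =>
      have h1 : (i + 1) % 3 = 1 := by omega
      rw [solLoopA.eq_def]
      simp [solLoopB, h, h1]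
      ring
  | a :: b :: c :: rest =>
      have h1 : (i + 1) % 3 = 1 := by omega
      have h2 : (i + 1 + 1) % 3 = 2 := by omega
      have h3 : (i + 1 + 1 + 1) % 3 = 0 := by omega
      rw [show solLoopB (a :: b :: c :: rest) i total =
            solLoopB rest (i + 1 + 1 + 1)
              (if (i+1+1) % 3 ≠ 2 then
                 (if (i+1) % 3 ≠ 2 then (if i % 3 ≠ 2 then total + a else total) + b
                  else (if i % 3 ≠ 2 then total + a else total))
                 + c
               else (if (i+1) % 3 ≠ 2 then (if i % 3 ≠ 2 then total + a else total) + b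
                  else (if i % 3 ≠ 2 then total + a else total)))
          from rfl]
      rw [solLoopB_eq rest _ _ h3]
      conv_rhs => rw [solLoopA.eq_def]
      have hlen : ¬ (rest.length + 1 + 1 + 1 < 3) := by omega
      simp [h, h1, h2]
      rw [if_neg hlen]
      ring
termination_by l.length

-- ===== VERDICT (by name: the statement is the Claim_ definition above) =====
theorem solution_spec : Claim_equal_solution := by
  intro C _
  unfold Spec_solution solution solution_alt
  rw [solLoopB_eq _ _ 0 rfl]
  simp
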